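-- pv_equiv track=rewrite | github.com/pedro19v/GIMME | GIMMECore/Subspace.py | initNumOfRemovedCombinations
-- ===== SOURCE A (Python) =====
-- import math
--
-- def initNumOfRemovedCombinations(integers, lengthOfA, maxFirstMemberOfM):
--     numOfRemovedCombinations = [[] for _ in range(len(integers))]
--
--     for i in range(len(integers)):
--         if lengthOfA[i] == integers[i]:
--             numOfRemovedCombinations[i] = 0
--
--         else:
--             numOfRemovedCombinations[i] = 0
--             for j in range(maxFirstMemberOfM[i], lengthOfA[i] - integers[i] + 1):
--                 numOfRemovedCombinations[i] = numOfRemovedCombinations[i] + math.comb(lengthOfA[i] - j+1, integers[i] - 1)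
--
--     return numOfRemovedCombinations
-- ===== SOURCE B (Python) =====
-- import math
--
-- def initNumOfRemovedCombinations(integers, lengthOfA, maxFirstMemberOfM):
--     # Hockey-stick identity: sum_{j=a}^{L-k} C(L-j+1, k-1) = C(L-a+2, k) - C(k+1, k)
--     out = []
--     for k, L, a in zip(integers, lengthOfA, maxFirstMemberOfM):
--         if k == L or a > L - k:
--             out.append(0)
--         else:
--             out.append(math.comb(L - a + 2, k) - (k + 1))
--     return out
-- ===== Notes on version B (the rewrite author's own statement) =====
-- stated objective: alternative
-- what changed: The inner loop summing consecutive binomial coefficients is replaced by the hockey-stick closed form C(L-a+2,k)-C(k+1,k), and the index-based outer loop by a single zip pass.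
import Mathlib
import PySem

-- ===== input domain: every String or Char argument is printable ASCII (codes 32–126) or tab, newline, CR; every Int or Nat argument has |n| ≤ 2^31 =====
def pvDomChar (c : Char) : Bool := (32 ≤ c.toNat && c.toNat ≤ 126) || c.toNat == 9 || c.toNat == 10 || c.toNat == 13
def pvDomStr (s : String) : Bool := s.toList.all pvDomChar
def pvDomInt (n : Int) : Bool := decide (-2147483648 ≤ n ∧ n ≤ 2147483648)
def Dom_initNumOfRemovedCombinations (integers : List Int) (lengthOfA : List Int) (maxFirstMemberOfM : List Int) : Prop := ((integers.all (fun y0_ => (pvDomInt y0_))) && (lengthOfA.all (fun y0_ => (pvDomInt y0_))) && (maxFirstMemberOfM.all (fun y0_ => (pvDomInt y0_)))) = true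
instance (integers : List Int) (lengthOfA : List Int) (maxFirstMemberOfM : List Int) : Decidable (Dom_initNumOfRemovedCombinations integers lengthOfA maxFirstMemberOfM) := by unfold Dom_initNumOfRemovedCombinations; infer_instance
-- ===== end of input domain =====

-- B replaces A's inner loop over consecutive binomials by the hockey-stick closed form
-- C(L-a+2,k) - (k+1) and traverses the three lists in one zip pass (objective: alternative algorithm).


-- math.comb(n, k): exact for 0 ≤ n and 0 ≤ k (Python raises ValueError on negative
-- arguments; Pre_ excludes every input on which such a call happens).
def pyComb (n k : Int) : Int := (Nat.choose n.toNat k.toNat : Int)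

-- ===== PORT A =====
def initNumOfRemovedCombinations (integers : List Int) (lengthOfA : List Int) (maxFirstMemberOfM : List Int) : List Int :=
  (List.range integers.length).map (fun (i : Nat) =>
    if PySem.List.pyGetD lengthOfA (i : Int) 0 = PySem.List.pyGetD integers (i : Int) 0 then 0
    else
      (PySem.List.pyRange (PySem.List.pyGetD maxFirstMemberOfM (i : Int) 0)
          (PySem.List.pyGetD lengthOfA (i : Int) 0 - PySem.List.pyGetD integers (i : Int) 0 + 1) 1).foldl
        (fun acc j => acc + pyComb (PySem.List.pyGetD lengthOfA (i : Int) 0 - j + 1)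
                                   (PySem.List.pyGetD integers (i : Int) 0 - 1)) 0)

-- ===== PORT B =====
def initNumOfRemovedCombinations_alt (integers : List Int) (lengthOfA : List Int) (maxFirstMemberOfM : List Int) : List Int :=
  List.zipWith3 (fun k L a => if k = L ∨ a > L - k then 0 else pyComb (L - a + 2) k - (k + 1))
    integers lengthOfA maxFirstMemberOfM

-- ===== PRECONDITION & SPEC =====
-- Pre_ = exactly the inputs on which A returns: the two auxiliary lists are at least as long
-- as `integers` (otherwise IndexError), and wherever the inner loop actually runs
-- (lengthOfA[i] ≠ integers[i] and the range is nonempty) integers[i] ≥ 1, since otherwise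
-- math.comb is called with second argument integers[i]-1 < 0 and raises ValueError.
def Pre_initNumOfRemovedCombinations (integers : List Int) (lengthOfA : List Int) (maxFirstMemberOfM : List Int) : Prop :=
  integers.length ≤ lengthOfA.length ∧ integers.length ≤ maxFirstMemberOfM.length ∧
  ∀ i : Nat, i < integers.length →
    (lengthOfA.getD i 0 ≠ integers.getD i 0 ∧
       maxFirstMemberOfM.getD i 0 ≤ lengthOfA.getD i 0 - integers.getD i 0) →
    1 ≤ integers.getD i 0
instance (integers : List Int) (lengthOfA : List Int) (maxFirstMemberOfM : List Int) : Decidable (Pre_initNumOfRemovedCombinations integers lengthOfA maxFirstMemberOfM) := by unfold Pre_initNumOfRemovedCombinations; infer_instance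

def pvWitness_initNumOfRemovedCombinations : List Int × List Int × List Int := ([2, 3, 5], [6, 3, 4], [1, 0, 2])

def Spec_initNumOfRemovedCombinations (integers : List Int) (lengthOfA : List Int) (maxFirstMemberOfM : List Int) (out : List Int) : Prop := out = initNumOfRemovedCombinations_alt integers lengthOfA maxFirstMemberOfM
instance (integers : List Int) (lengthOfA : List Int) (maxFirstMemberOfM : List Int) (out : List Int) : Decidable (Spec_initNumOfRemovedCombinations integers lengthOfA maxFirstMemberOfM out) := by unfold Spec_initNumOfRemovedCombinations; infer_instance

-- ===== CLAIM (what is proved, stated in full; the proofs are below) =====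
def Claim_equal_initNumOfRemovedCombinations : Prop := ∀ (integers : List Int) (lengthOfA : List Int) (maxFirstMemberOfM : List Int), Dom_initNumOfRemovedCombinations integers lengthOfA maxFirstMemberOfM → Pre_initNumOfRemovedCombinations integers lengthOfA maxFirstMemberOfM → Spec_initNumOfRemovedCombinations integers lengthOfA maxFirstMemberOfM (initNumOfRemovedCombinations integers lengthOfA maxFirstMemberOfM)

-- ===== LEMMAS AND PROOFS =====

-- Pascal's rule lifted to pyComb.
lemma pyComb_pascal (n k : Int) (hn : 0 ≤ n) (hk : 1 ≤ k) :
    pyComb n (k - 1) + pyComb n k = pyComb (n + 1) k := by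
  unfold pyComb
  have h1 : (n + 1).toNat = n.toNat + 1 := by omega
  have h2 : k.toNat = (k - 1).toNat + 1 := by omega
  rw [h1, h2, Nat.choose_succ_succ]
  push_cast
  ring

-- C(k+1, k) = k+1 for 1 ≤ k (in fact 0 ≤ k).
lemma pyComb_succ_self (k : Int) (hk : 1 ≤ k) : pyComb (k + 1) k = k + 1 := by
  unfold pyComb
  have h1 : (k + 1).toNat = k.toNat + 1 := by omega
  rw [h1, Nat.choose_succ_self_right]
  omega

-- Hockey-stick: the sum A's inner loop computes equals B's closed form.
lemma hockey_stick (k L : Int) (hk : 1 ≤ k) :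
    ∀ (n : Nat) (a : Int), L - k + 1 - a = n →
      ((PySem.List.pyRange a (L - k + 1) 1).map (fun j => pyComb (L - j + 1) (k - 1))).sum
        = pyComb (L - a + 2) k - (k + 1) := by
  intro n
  induction n with
  | zero =>
    intro a ha
    have hae : a = L - k + 1 := by omega
    rw [PySem.List.pyRange_one_eq_nil (by omega)]
    subst hae
    have : L - (L - k + 1) + 2 = k + 1 := by ring
    rw [this, pyComb_succ_self k hk]
    simp
  | succ m ih =>
    intro a ha
    rw [PySem.List.pyRange_one_cons (by omega)]
    rw [List.map_cons, List.sum_cons, ih (a + 1) (by omega)]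
    have hpas := pyComb_pascal (L - a + 1) k (by omega) hk
    have e1 : L - (a + 1) + 2 = L - a + 1 := by ring
    have e2 : L - a + 2 = L - a + 1 + 1 := by ring
    rw [e1, e2, ← hpas]
    ring

-- One entry of A equals one entry of B, given the per-index part of Pre_.
lemma entry_eq (k L a : Int)
    (hpre : (L ≠ k ∧ a ≤ L - k) → 1 ≤ k) :
    (if L = k then (0 : Int)
     else (PySem.List.pyRange a (L - k + 1) 1).foldl
            (fun acc j => acc + pyComb (L - j + 1) (k - 1)) 0)
      = (if k = L ∨ a > L - k then 0 else pyComb (L - a + 2) k - (k + 1)) := by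
  by_cases hLk : L = k
  · simp [hLk]
  · rw [if_neg hLk]
    by_cases hr : a > L - k
    · rw [if_pos (Or.inr hr), PySem.List.pyRange_one_eq_nil (by omega)]
      rfl
    · rw [if_neg (by tauto)]
      rw [PySem.List.foldl_add]
      have hk : 1 ≤ k := hpre ⟨hLk, by omega⟩
      rw [hockey_stick k L hk (L - k + 1 - a).toNat a (by omega)]
      ring

-- The index-based outer loop of A, on lists long enough, is B's zip pass.
lemma main_eq : ∀ (l1 l2 l3 : List Int),
    l1.length ≤ l2.length → l1.length ≤ l3.length →
    (∀ i : Nat, i < l1.length →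
      (l2.getD i 0 ≠ l1.getD i 0 ∧ l3.getD i 0 ≤ l2.getD i 0 - l1.getD i 0) → 1 ≤ l1.getD i 0) →
    initNumOfRemovedCombinations l1 l2 l3 = initNumOfRemovedCombinations_alt l1 l2 l3 := by
  intro l1
  induction l1 with
  | nil => intro l2 l3 _ _ _; rfl
  | cons k ks ih =>
    intro l2 l3 h2 h3 hpre
    cases l2 with
    | nil => simp at h2
    | cons L Ls =>
      cases l3 with
      | nil => simp at h3
      | cons a as =>
        have hA : initNumOfRemovedCombinations (k :: ks) (L :: Ls) (a :: as)
            = (if L = k then (0 : Int)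
               else (PySem.List.pyRange a (L - k + 1) 1).foldl
                      (fun acc j => acc + pyComb (L - j + 1) (k - 1)) 0)
              :: initNumOfRemovedCombinations ks Ls as := by
          unfold initNumOfRemovedCombinations
          rw [List.length_cons, List.range_succ_eq_map, List.map_cons, List.map_map]
          congr 1
          · norm_num [PySem.List.pyGetD_natCast]
          · apply List.map_congr_left
            intro i _
            have hc : ((i : Int) + 1) = (((i + 1 : Nat)) : Int) := by push_cast; ring
            simp only [Function.comp, Nat.succ_eq_add_one, Nat.cast_add, Nat.cast_one] 
            rw [hc]
            simp only [PySem.List.pyGetD_natCast, List.getD_cons_succ]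
        have hB : initNumOfRemovedCombinations_alt (k :: ks) (L :: Ls) (a :: as)
            = (if k = L ∨ a > L - k then (0 : Int) else pyComb (L - a + 2) k - (k + 1))
              :: initNumOfRemovedCombinations_alt ks Ls as := rfl
        rw [hA, hB]
        congr 1
        · exact entry_eq k L a (by have := hpre 0 (by simp); simpa using this)
        · exact ih Ls as (by simpa using h2) (by simpa using h3)
            (fun i hi hcond => by
              have := hpre (i + 1) (by simpa using hi) (by simpa using hcond)
              simpa using this)

-- ===== VERDICT (by name: the statement is the Claim_ definition above) =====
theorem initNumOfRemovedCombinations_spec : Claim_equal_initNumOfRemovedCombinations := by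
  intro l1 l2 l3 _ hpre
  unfold Spec_initNumOfRemovedCombinations
  exact main_eq l1 l2 l3 hpre.1 hpre.2.1 hpre.2.2
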